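-- pv_equiv track=rewrite | github.com/pablopda/linux-speech-tools | analysis/update_test_suites.py | format_chunks_for_file
-- ===== SOURCE A (Python) =====
-- def format_chunks_for_file(chunks):
--     """Format chunks as they appear in the test suite files"""
--
--     # Handle single chunk vs multiple chunks
--     if len(chunks) == 1:
--         return f'[\n            "{chunks[0]}"\n        ]'
--     else:
--         formatted_lines = []
--         for i, chunk in enumerate(chunks):
--             if i == 0:
--                 formatted_lines.append(f'[\n            "{chunk}",')
--             elif i == len(chunks) - 1:
--                 formatted_lines.append(f'            "{chunk}"\n        ]')
--             else:
--                 formatted_lines.append(f'            "{chunk}",')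
--         return '\n'.join(formatted_lines)
-- ===== SOURCE B (Python) =====
-- def format_chunks_for_file(chunks):
--     """Format chunks as they appear in the test suite files"""
--     if not chunks:
--         return ''
--     body = ',\n'.join(f'            "{chunk}"' for chunk in chunks)
--     return '[\n' + body + '\n        ]'
-- ===== Notes on version B (the rewrite author's own statement) =====
-- stated objective: simpler
-- what changed: Replaces A's single-chunk special case and first/middle/last positional branching inside the loop by one uniform ',\n'-join of identically quoted chunks wrapped once in fixed '[\n' / '\n ]' brackets (empty list guarded to '').
import Mathlib
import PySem

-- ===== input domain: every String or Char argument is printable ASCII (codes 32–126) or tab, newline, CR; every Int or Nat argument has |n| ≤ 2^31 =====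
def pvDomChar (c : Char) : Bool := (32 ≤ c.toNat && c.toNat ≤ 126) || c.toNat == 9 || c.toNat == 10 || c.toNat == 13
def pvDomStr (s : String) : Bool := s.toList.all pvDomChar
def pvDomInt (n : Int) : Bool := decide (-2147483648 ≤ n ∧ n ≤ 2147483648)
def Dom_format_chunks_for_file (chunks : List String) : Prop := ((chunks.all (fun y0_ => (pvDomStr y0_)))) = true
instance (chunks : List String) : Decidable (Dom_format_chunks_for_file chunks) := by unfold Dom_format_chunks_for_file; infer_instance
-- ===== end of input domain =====

-- B replaces A's single-chunk special case and first/middle/last index branching by one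
-- uniform ',\n'-join of quoted chunks wrapped in fixed brackets (objective: simpler).

-- ===== PORT A =====
-- chunks[0] is guarded by len(chunks) == 1, so pyGetD's default is never used
def format_chunks_for_file (chunks : List String) : String :=
  if (chunks.length : Int) == 1 then
    "[\n            \"" ++ PySem.List.pyGetD chunks 0 "" ++ "\"\n        ]"
  else
    let formatted_lines := (PySem.List.enumerate chunks 0).foldl
      (fun acc ic =>
        if ic.1 == 0 then
          acc ++ ["[\n            \"" ++ ic.2 ++ "\","]
        else if ic.1 == (chunks.length : Int) - 1 then
          acc ++ ["            \"" ++ ic.2 ++ "\"\n        ]"]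
        else
          acc ++ ["            \"" ++ ic.2 ++ "\","]) []
    PySem.Str.join "\n" formatted_lines

-- ===== PORT B =====
def format_chunks_for_file_alt (chunks : List String) : String :=
  if chunks.isEmpty then ""
  else
    let body := PySem.Str.join ",\n" (chunks.map (fun chunk => "            \"" ++ chunk ++ "\""))
    "[\n" ++ body ++ "\n        ]"

-- ===== PRECONDITION & SPEC =====
def Spec_format_chunks_for_file (chunks : List String) (out : String) : Prop := out = format_chunks_for_file_alt chunks
instance (chunks : List String) (out : String) : Decidable (Spec_format_chunks_for_file chunks out) := by unfold Spec_format_chunks_for_file; infer_instance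

-- ===== CLAIM (what is proved, stated in full; the proofs are below) =====
def Claim_equal_format_chunks_for_file : Prop := ∀ (chunks : List String), Dom_format_chunks_for_file chunks → Spec_format_chunks_for_file chunks (format_chunks_for_file chunks)

-- ===== LEMMAS AND PROOFS =====

-- the per-element line chosen by A's loop body, as a function of the enumerate pair
def pvGA (L : Int) (ic : Int × String) : String :=
  if ic.1 == 0 then "[\n            \"" ++ ic.2 ++ "\","
  else if ic.1 == L - 1 then "            \"" ++ ic.2 ++ "\"\n        ]"
  else "            \"" ++ ic.2 ++ "\","

-- the tail of A's line list (all middle lines plus the closing line)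
def pvSeg : String → List String → List String
  | x, [] => ["            \"" ++ x ++ "\"\n        ]"]
  | x, y :: ys => ("            \"" ++ x ++ "\",") :: pvSeg y ys

-- B's quoted chunk, at the character level
def pvPc (c : String) : List Char := "            \"".toList ++ c.toList ++ ['"']

theorem pvFoldl_push (g : Int × String → String) (l : List (Int × String)) (a : List String) :
    l.foldl (fun acc ic => acc ++ [g ic]) a = a ++ l.map g := by
  induction l generalizing a with
  | nil => simp
  | cons x xs ih => simp [List.foldl_cons, ih]

theorem pvLoop_eq (L : Int) (l : List (Int × String)) (a : List String) :
    l.foldl (fun acc ic =>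
      if ic.1 == 0 then acc ++ ["[\n            \"" ++ ic.2 ++ "\","]
      else if ic.1 == L - 1 then acc ++ ["            \"" ++ ic.2 ++ "\"\n        ]"]
      else acc ++ ["            \"" ++ ic.2 ++ "\","]) a = a ++ l.map (pvGA L) := by
  have h : (fun (acc : List String) (ic : Int × String) =>
      if ic.1 == 0 then acc ++ ["[\n            \"" ++ ic.2 ++ "\","]
      else if ic.1 == L - 1 then acc ++ ["            \"" ++ ic.2 ++ "\"\n        ]"]
      else acc ++ ["            \"" ++ ic.2 ++ "\","]) =
      (fun acc ic => acc ++ [pvGA L ic]) := by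
    funext acc ic
    simp only [pvGA]
    split_ifs <;> rfl
  rw [h, pvFoldl_push]

theorem pvMapE (ys : List String) : ∀ (x : String) (s L : Int), 1 ≤ s → s + ys.length = L - 1 →
    (PySem.List.enumerate (x :: ys) s).map (pvGA L) = pvSeg x ys := by
  induction ys with
  | nil =>
    intro x s L hs hL
    simp only [PySem.List.enumerate_cons, PySem.List.enumerate_nil, List.map_cons, List.map_nil, pvSeg]
    have h0 : (s == 0) = false := by simp; omega
    have h1 : (s == L - 1) = true := by simp; simpa using hL
    simp [pvGA, h0, h1]
  | cons y ys ih =>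
    intro x s L hs hL
    simp only [List.length_cons] at hL
    have h0 : (s == 0) = false := by simp; omega
    have h1 : (s == L - 1) = false := by simp; omega
    rw [PySem.List.enumerate_cons, List.map_cons,
      ih y (s + 1) L (by omega) (by push_cast at hL ⊢; omega)]
    simp [pvGA, h0, h1, pvSeg]

theorem pvSeg_cons (y : String) (ys : List String) : ∃ z zs, pvSeg y ys = z :: zs := by
  cases ys <;> exact ⟨_, _, rfl⟩

theorem pvSegChars (ys : List String) : ∀ (x : String),
    PySem.Chars.join ['\n'] ((pvSeg x ys).map String.toList)
      = PySem.Chars.join [',', '\n'] (List.map pvPc (x :: ys)) ++ "\n        ]".toList := by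
  induction ys with
  | nil =>
    intro x
    simp only [pvSeg, List.map_cons, List.map_nil, PySem.Chars.join_singleton, pvPc]
    rw [String.toList_append, String.toList_append]
    have : ("\"\n        ]" : String).toList = ['"'] ++ "\n        ]".toList := by decide
    simp [this]
  | cons y ys ih =>
    intro x
    obtain ⟨z, zs, hz⟩ := pvSeg_cons y ys
    simp only [pvSeg, List.map_cons, hz]
    rw [PySem.Chars.join_cons_cons]
    have hmz : z.toList :: List.map String.toList zs = List.map String.toList (pvSeg y ys) := by
      rw [hz, List.map_cons]
    rw [hmz, ih y]
    rw [PySem.Chars.join_cons_cons]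
    rw [String.toList_append, String.toList_append]
    have : ("\"," : String).toList = ['"', ','] := by decide
    simp [this, pvPc]

theorem pvPcS_toList (c : String) : ("            \"" ++ c ++ "\"").toList = pvPc c := by
  rw [String.toList_append, String.toList_append]
  have : ("\"" : String).toList = ['"'] := by decide
  simp [this, pvPc]

-- ===== VERDICT (by name: the statement is the Claim_ definition above) =====
theorem format_chunks_for_file_spec : Claim_equal_format_chunks_for_file := by
  intro chunks _
  unfold Spec_format_chunks_for_file
  match chunks with
  | [] => rfl
  | [c] =>
    apply String.toList_inj.mp
    simp only [format_chunks_for_file, format_chunks_for_file_alt]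
    norm_num
    have h1 : ("[\n            \"" : String).toList = "[\n".toList ++ "            \"".toList := by decide
    have h2 : ("\"\n        ]" : String).toList = ['"'] ++ "\n        ]".toList := by decide
    have h5 : ("\"" : String).toList = ['"'] := by decide
    rw [h1, h2, h5]
    simp
  | c :: c2 :: rest =>
    apply String.toList_inj.mp
    simp only [format_chunks_for_file, format_chunks_for_file_alt]
    rw [if_neg (by simp; omega)]
    simp only [List.isEmpty_cons, Bool.false_eq_true, if_false]
    rw [pvLoop_eq ((c :: c2 :: rest).length : Int)]
    rw [PySem.List.enumerate_cons, List.map_cons]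
    rw [show (0 : Int) + 1 = 1 from rfl]
    rw [pvMapE rest c2 1 ((c :: c2 :: rest).length : Int) le_rfl
        (by simp only [List.length_cons]; push_cast; omega)]
    have hga : pvGA ((c :: c2 :: rest).length : Int) (0, c) = "[\n            \"" ++ c ++ "\"," := by
      simp [pvGA]
    rw [hga]
    obtain ⟨z, zs, hz⟩ := pvSeg_cons c2 rest
    rw [PySem.Str.toList_join, List.nil_append, List.map_cons, hz, List.map_cons,
      PySem.Chars.join_cons_cons, ← List.map_cons, ← hz,
      show ("\n" : String).toList = ['\n'] from by decide, pvSegChars rest c2]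
    rw [String.toList_append, String.toList_append, String.toList_append, String.toList_append,
      PySem.Str.toList_join]
    have hm : List.map String.toList (List.map (fun chunk => "            \"" ++ chunk ++ "\"") (c :: c2 :: rest))
        = List.map pvPc (c :: c2 :: rest) := by
      rw [List.map_map]; exact List.map_congr_left (fun a _ => pvPcS_toList a)
    rw [hm, show List.map pvPc (c :: c2 :: rest) = pvPc c :: pvPc c2 :: List.map pvPc rest from rfl,
      PySem.Chars.join_cons_cons]
    have h1 : ("[\n            \"" : String).toList = "[\n".toList ++ "            \"".toList := by decide
    have h2 : ("\"," : String).toList = ['"', ','] := by decide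
    have h3 : ("\n" : String).toList = ['\n'] := by decide
    have h4 : (",\n" : String).toList = [',', '\n'] := by decide
    simp [h1, h2, h4, pvPc]
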